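-- pv_equiv track=rewrite | github.com/binref/refinery | refinery/lib/nsis/decompiler.py | nsis_escape
-- ===== SOURCE A (Python) =====
-- def nsis_escape(s: str) -> str:
--     """
--     Apply NSIS escape sequences to a string for decompiler output.
--     """
--     out: list[str] = []
--     for c in s:
--         if c == '\t':
--             out.append('$\\t')
--         elif c == '\n':
--             out.append('$\\n')
--         elif c == '\r':
--             out.append('$\\r')
--         elif c == '"':
--             out.append('$\\"')
--         else:
--             out.append(c)
--     return ''.join(out)
-- ===== SOURCE B (Python) =====
-- def nsis_escape(s: str) -> str:
--     """Apply NSIS escape sequences in staged passes: one whole-string replace per escaped character."""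
--     for ch, esc in (('\t', '$\\t'), ('\n', '$\\n'), ('\r', '$\\r'), ('"', '$\\"')):
--         s = s.replace(ch, esc)
--     return s
-- ===== Notes on version B (the rewrite author's own statement) =====
-- stated objective: alternative
-- what changed: Replaces A's single per-character branch-and-append loop with four staged whole-string replace passes (one str.replace per escaped character), correct because no replacement string contains any character escaped by a later pass.
import Mathlib
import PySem

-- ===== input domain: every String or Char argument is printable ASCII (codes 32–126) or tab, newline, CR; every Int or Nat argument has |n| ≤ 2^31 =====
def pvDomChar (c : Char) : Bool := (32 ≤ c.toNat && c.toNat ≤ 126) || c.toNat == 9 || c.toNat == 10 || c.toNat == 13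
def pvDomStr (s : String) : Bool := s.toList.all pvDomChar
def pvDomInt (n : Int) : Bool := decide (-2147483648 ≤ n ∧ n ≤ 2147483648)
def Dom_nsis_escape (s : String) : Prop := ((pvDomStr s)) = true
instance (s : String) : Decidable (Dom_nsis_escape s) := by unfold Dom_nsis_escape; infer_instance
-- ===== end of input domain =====

-- B replaces A's per-character branch-and-append loop with four staged whole-string replace passes (alternative decomposition).

-- ===== PORT A =====
-- literal port of A: build a list of pieces by branching on each character, then join
def nsis_escape (s : String) : String :=
  String.join (s.toList.foldl (fun out c =>
    if c = '\t' then out ++ ["$\\t"]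
    else if c = '\n' then out ++ ["$\\n"]
    else if c = '\r' then out ++ ["$\\r"]
    else if c = '"' then out ++ ["$\\\""]
    else out ++ [String.ofList [c]]) [])

-- ===== PORT B =====
-- the four (character, escape) stages, in B's order
def nsisStages : List (String × String) :=
  [("\t", "$\\t"), ("\n", "$\\n"), ("\r", "$\\r"), ("\"", "$\\\"")]

-- B: fold over the stages, each one a whole-string replace pass (s = s.replace(ch, esc))
def nsis_escape_alt (s : String) : String :=
  nsisStages.foldl (fun s p => PySem.Str.replace s p.1 p.2) s

-- ===== PRECONDITION & SPEC =====
def Spec_nsis_escape (s : String) (out : String) : Prop := out = nsis_escape_alt s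
instance (s : String) (out : String) : Decidable (Spec_nsis_escape s out) := by unfold Spec_nsis_escape; infer_instance

-- ===== CLAIM (what is proved, stated in full; the proofs are below) =====
def Claim_equal_nsis_escape : Prop := ∀ (s : String), Dom_nsis_escape s → Spec_nsis_escape s (nsis_escape s)

-- ===== LEMMAS AND PROOFS =====

-- A's branch chain as a value: the piece appended for character c
def nsisPiece (c : Char) : String :=
  if c = '\t' then "$\\t"
  else if c = '\n' then "$\\n"
  else if c = '\r' then "$\\r"
  else if c = '"' then "$\\\""
  else String.ofList [c]

-- one replace stage, on character lists
def nsisStage (ch : Char) (new : List Char) (l : List Char) : List Char :=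
  l.flatMap (fun c => if c = ch then new else [c])

-- Chars.replace.go with a single-character pattern, characterised
lemma replace_go_single (ch : Char) (new : List Char) :
    ∀ (l : List Char) (fuel : Nat) (acc : List Char), l.length ≤ fuel →
    PySem.Chars.replace.go [ch] new fuel l acc
      = acc.reverse ++ l.flatMap (fun c => if c = ch then new else [c]) := by
  intro l
  induction l with
  | nil =>
    intro fuel acc h
    cases fuel <;> simp [PySem.Chars.replace.go]
  | cons c t ih =>
    intro fuel acc h
    cases fuel with
    | zero => simp at h
    | succ fuel =>
      rw [PySem.Chars.replace.go]
      by_cases hc : c = ch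
      · subst hc
        simp only [List.isPrefixOf, beq_self_eq_true, Bool.true_and,
          if_true, List.length_cons, List.length_nil, Nat.zero_add, List.drop_succ_cons,
          List.drop_zero]
        rw [ih _ _ (Nat.le_of_succ_le_succ h)]
        simp
      · have hpre : ([ch].isPrefixOf (c :: t)) = false := by
          simp only [List.isPrefixOf, Bool.and_true]
          exact beq_eq_false_iff_ne.mpr (fun h' => hc h'.symm)
        simp only [hpre, Bool.false_eq_true, if_false]
        rw [ih _ _ (Nat.le_of_succ_le_succ h)]
        simp [hc]

-- replace with a single-character pattern is a per-character flatMap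
lemma replace_single (ch : Char) (new l : List Char) :
    PySem.Chars.replace l [ch] new = nsisStage ch new l := by
  simpa [PySem.Chars.replace, nsisStage] using
    replace_go_single ch new l l.length [] (le_refl _)

-- the four staged passes of B collapse to A's single per-character piece map
lemma stages_eq_piece (l : List Char) :
    nsisStage '"' "$\\\"".toList
      (nsisStage '\r' "$\\r".toList
        (nsisStage '\n' "$\\n".toList
          (nsisStage '\t' "$\\t".toList l)))
      = l.flatMap (fun c => (nsisPiece c).toList) := by
  induction l with
  | nil => rfl
  | cons c t ih =>
    simp only [nsisStage, List.flatMap_cons] at ih ⊢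
    rw [List.flatMap_append, List.flatMap_append, List.flatMap_append, ih]
    congr 1
    unfold nsisPiece
    by_cases h1 : c = '\t'
    · subst h1; decide
    by_cases h2 : c = '\n'
    · subst h2; decide
    by_cases h3 : c = '\r'
    · subst h3; decide
    by_cases h4 : c = '"'
    · subst h4; decide
    · simp [h1, h2, h3, h4]

-- String.join in terms of toList
lemma join_foldl_toList (l : List String) (a : String) :
    (List.foldl (fun r s => r ++ s) a l).toList = a.toList ++ l.flatMap String.toList := by
  induction l generalizing a with
  | nil => simp
  | cons b l ih => simp [ih, String.toList_append]

lemma join_toList (l : List String) : (String.join l).toList = l.flatMap String.toList := by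
  simpa [String.join] using join_foldl_toList l ""

-- A's loop, characterised on character lists
lemma nsis_loop (l : List Char) (acc : List String) :
    (l.foldl (fun out c =>
      if c = '\t' then out ++ ["$\\t"]
      else if c = '\n' then out ++ ["$\\n"]
      else if c = '\r' then out ++ ["$\\r"]
      else if c = '"' then out ++ ["$\\\""]
      else out ++ [String.ofList [c]]) acc).flatMap String.toList =
    acc.flatMap String.toList ++ l.flatMap (fun c => (nsisPiece c).toList) := by
  induction l generalizing acc with
  | nil => simp
  | cons c l ih =>
    have hstep : (if c = '\t' then acc ++ ["$\\t"]
      else if c = '\n' then acc ++ ["$\\n"]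
      else if c = '\r' then acc ++ ["$\\r"]
      else if c = '"' then acc ++ ["$\\\""]
      else acc ++ [String.ofList [c]]) = acc ++ [nsisPiece c] := by
      unfold nsisPiece; split_ifs <;> rfl
    simp only [List.foldl_cons, hstep, ih, List.flatMap_append, List.flatMap_cons,
      List.flatMap_nil, List.append_nil, List.append_assoc]

-- ===== VERDICT (by name: the statement is the Claim_ definition above) =====
theorem nsis_escape_spec : Claim_equal_nsis_escape := by
  intro s _
  unfold Spec_nsis_escape
  have hB : (nsis_escape_alt s).toList =
      nsisStage '"' "$\\\"".toList
        (nsisStage '\r' "$\\r".toList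
          (nsisStage '\n' "$\\n".toList
            (nsisStage '\t' "$\\t".toList s.toList))) := by
    simp only [nsis_escape_alt, nsisStages, List.foldl_cons, List.foldl_nil,
      PySem.Str.toList_replace]
    rw [show ("\t" : String).toList = ['\t'] from rfl,
        show ("\n" : String).toList = ['\n'] from rfl,
        show ("\r" : String).toList = ['\r'] from rfl,
        show ("\"" : String).toList = ['"'] from rfl]
    rw [replace_single, replace_single, replace_single, replace_single]
  have hA : (nsis_escape s).toList = s.toList.flatMap (fun c => (nsisPiece c).toList) := by
    unfold nsis_escape
    rw [join_toList, nsis_loop]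
    simp
  have : (nsis_escape s).toList = (nsis_escape_alt s).toList := by
    rw [hA, hB, stages_eq_piece]
  calc nsis_escape s = String.ofList (nsis_escape s).toList := (String.ofList_toList (s := nsis_escape s)).symm
    _ = String.ofList (nsis_escape_alt s).toList := by rw [this]
    _ = nsis_escape_alt s := String.ofList_toList (s := nsis_escape_alt s)
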